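-- pv_equiv track=rewrite | github.com/rf-iasys/OEIS | OEIS_A002623_Compare.py | sieve_A002623
-- ===== SOURCE A (Python) =====
-- import math
--
-- def sieve_A002623(n):
--     marked = []
--     current = 1
--     k = 1
--
--     while len(marked) < n:
--         marked.append(current)
--         k += math.floor((3 * current) / (k * 2))
--         current += k
--
--     return marked
-- ===== SOURCE B (Python) =====
-- def sieve_A002623(n):
--     return [(i + 2) * (i + 4) * (2 * i + 3) // 24 for i in range(n)]
-- ===== Notes on version B (the rewrite author's own statement) =====
-- stated objective: simpler
-- what changed: Replaces the stateful recurrence carrying `current` and `k` (with a float floor-division update) by the closed form for A002623, emitting each term directly from its index with exact integer arithmetic and no carried state.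
import Mathlib
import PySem

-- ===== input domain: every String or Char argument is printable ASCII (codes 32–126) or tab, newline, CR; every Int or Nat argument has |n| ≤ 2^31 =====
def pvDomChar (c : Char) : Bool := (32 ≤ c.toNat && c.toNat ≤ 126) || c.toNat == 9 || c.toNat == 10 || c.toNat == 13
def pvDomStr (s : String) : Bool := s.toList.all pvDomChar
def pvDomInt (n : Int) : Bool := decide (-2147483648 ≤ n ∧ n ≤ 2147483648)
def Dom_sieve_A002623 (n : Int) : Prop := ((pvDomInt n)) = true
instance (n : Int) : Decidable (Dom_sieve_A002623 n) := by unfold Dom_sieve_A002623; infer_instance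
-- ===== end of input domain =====

-- B replaces A's stateful recurrence (current/k with a float floor-division update) by the
-- exact closed form (i+2)*(i+4)*(2*i+3)//24 per index: simpler, no carried state.


-- ===== PORT A =====
-- while len(marked) < n: each pass appends exactly one element, so the loop runs
-- max(n,0) times; that count is the structural fuel.  math.floor((3*current)/(k*2))
-- is ported as exact integer floor division (exact here: the quotient is far from
-- the float rounding error on the whole sampled domain).
def sieveA_loop : Nat → List Int → Int → Int → List Int
  | 0, marked, _, _ => marked
  | Nat.succ m, marked, current, k =>
      let k' := k + PySem.Int.floordiv (3 * current) (k * 2)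
      sieveA_loop m (marked ++ [current]) (current + k') k'

def sieve_A002623 (n : Int) : List Int := sieveA_loop n.toNat [] 1 1

-- ===== PORT B =====
-- body of Source B's comprehension
def A2623term (i : Int) : Int := PySem.Int.floordiv ((i + 2) * (i + 4) * (2 * i + 3)) 24

def sieve_A002623_alt (n : Int) : List Int := (PySem.List.pyRange 0 n 1).map A2623term

-- ===== PRECONDITION & SPEC =====
def Spec_sieve_A002623 (n : Int) (out : List Int) : Prop := out = sieve_A002623_alt n
instance (n : Int) (out : List Int) : Decidable (Spec_sieve_A002623 n out) := by unfold Spec_sieve_A002623; infer_instance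

-- ===== CLAIM (what is proved, stated in full; the proofs are below) =====
def Claim_equal_sieve_A002623 : Prop := ∀ (n : Int), Dom_sieve_A002623 n → Spec_sieve_A002623 n (sieve_A002623 n)

-- ===== LEMMAS AND PROOFS =====

-- invariant of A's loop just before the iteration that appends the term of index j
def sieveInv (j : Nat) (c k : Int) : Prop :=
  24 * c = ((j : Int) + 2) * ((j : Int) + 4) * (2 * (j : Int) + 3) - 3 * ((j % 2 : Nat) : Int)
  ∧ 4 * k = ((j : Int) + 2) ^ 2 - ((j % 2 : Nat) : Int)

lemma sieveInv_k_pos {j : Nat} {c k : Int} (h : sieveInv j c k) : 0 < k := by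
  obtain ⟨-, h2⟩ := h
  have hj : (0 : Int) ≤ (j : Int) := Int.natCast_nonneg j
  have hr : ((j % 2 : Nat) : Int) ≤ 1 := by omega
  nlinarith [sq_nonneg ((j : Int) + 2)]

lemma sieveInv_term {j : Nat} {c k : Int} (h : sieveInv j c k) : A2623term (j : Int) = c := by
  obtain ⟨h1, -⟩ := h
  unfold A2623term
  rw [PySem.Int.floordiv_eq_iff_of_pos (by norm_num)]
  have hr : (0 : Int) ≤ ((j % 2 : Nat) : Int) ∧ ((j % 2 : Nat) : Int) ≤ 1 := by omega
  constructor <;> linarith [hr.1, hr.2]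

lemma sieveInv_step {j : Nat} {c k : Int} (h : sieveInv j c k) :
    sieveInv (j + 1) (c + (k + PySem.Int.floordiv (3 * c) (k * 2)))
      (k + PySem.Int.floordiv (3 * c) (k * 2)) := by
  have hkpos := sieveInv_k_pos h
  obtain ⟨h1, h2⟩ := h
  have hb : (0 : Int) < k * 2 := by omega
  rcases Nat.even_or_odd j with ⟨a, ha⟩ | ⟨a, ha⟩
  · -- j = a + a (even)
    subst ha
    rw [show (a + a) % 2 = 0 from by omega] at h1 h2
    push_cast at h1 h2
    have hq : PySem.Int.floordiv (3 * c) (k * 2) = (a : Int) + 1 := by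
      rw [PySem.Int.floordiv_eq_iff_of_pos hb]
      have hk : k = ((a : Int) + 1) ^ 2 := by nlinarith
      subst hk
      constructor <;> nlinarith [Int.natCast_nonneg a, sq_nonneg (a : Int)]
    rw [hq]
    unfold sieveInv
    rw [show (a + a + 1) % 2 = 1 from by omega]
    push_cast
    constructor
    · linear_combination h1 + 6 * h2
    · linear_combination h2
  · -- j = 2*a + 1 (odd)
    subst ha
    rw [show (2 * a + 1) % 2 = 1 from by omega] at h1 h2
    push_cast at h1 h2
    have hq : PySem.Int.floordiv (3 * c) (k * 2) = (a : Int) + 2 := by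
      rw [PySem.Int.floordiv_eq_iff_of_pos hb]
      have hk : k = ((a : Int) + 1) * ((a : Int) + 2) := by nlinarith
      subst hk
      constructor <;> nlinarith [Int.natCast_nonneg a, sq_nonneg (a : Int)]
    rw [hq]
    unfold sieveInv
    rw [show (2 * a + 1 + 1) % 2 = 0 from by omega]
    push_cast
    constructor
    · linear_combination h1 + 6 * h2
    · linear_combination h2

lemma sieveA_loop_eq (m : Nat) : ∀ (j : Nat) (marked : List Int) (c k : Int),
    sieveInv j c k →
    sieveA_loop m marked c k
      = marked ++ (PySem.List.pyRange (j : Int) ((j : Int) + (m : Int)) 1).map A2623term := by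
  induction m with
  | zero =>
      intro j marked c k _
      rw [PySem.List.pyRange_one_eq_nil (by omega)]
      simp [sieveA_loop]
  | succ m ih =>
      intro j marked c k h
      have hstep := sieveInv_step h
      have hrec := ih (j + 1) (marked ++ [c]) _ _ hstep
      push_cast at hrec ⊢
      rw [PySem.List.pyRange_one_cons (by omega)]
      simp only [sieveA_loop]
      have he : (j : Int) + 1 + (m : Int) = (j : Int) + ((m : Int) + 1) := by ring
      rw [hrec, he, List.map_cons, sieveInv_term h, List.append_assoc, List.singleton_append]

-- ===== VERDICT (by name: the statement is the Claim_ definition above) =====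
theorem sieve_A002623_spec : Claim_equal_sieve_A002623 := by
  intro n _
  unfold Spec_sieve_A002623 sieve_A002623 sieve_A002623_alt
  have h0 : sieveInv 0 1 1 := by constructor <;> norm_num
  rw [sieveA_loop_eq n.toNat 0 [] 1 1 h0]
  rcases (by omega : n ≤ 0 ∨ 0 < n) with hn | hn
  · rw [show n.toNat = 0 from by omega, PySem.List.pyRange_one_eq_nil (by omega),
        PySem.List.pyRange_one_eq_nil (by omega)]
    simp
  · have h1 : ((n.toNat : Int)) = n := by omega
    simp [h1]
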